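-- pv_equiv track=rewrite | github.com/Caffa/Smart-Butler-Starter | Reference Code/Menubar App/src/handlers.py | _parse_save_format_tokens
-- ===== SOURCE A (Python) =====
-- def _parse_save_format_tokens(save_format):
--     """Parse *-notes-save-format string into tokens. Returns set of lowercase tokens."""
--     if not save_format or not str(save_format).strip():
--         return set()
--     raw = str(save_format).strip().lower()
--     return {
--         t.strip()
--         for t in raw.replace(" ", ",").split(",")
--         if t.strip() in ("simple", "divider", "timestamp", "bullet-list")
--     }
-- ===== SOURCE B (Python) =====
-- _VOCAB = ("simple", "divider", "timestamp", "bullet-list")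
--
--
-- def _parse_save_format_tokens(save_format):
--     """One-pass character scanner with an explicit token accumulator."""
--     result = set()
--     if save_format is None:
--         return result
--     raw = str(save_format).strip().lower()
--     token = []
--     for ch in raw + ",":
--         if ch in (" ", ","):
--             t = "".join(token).strip()
--             if t in _VOCAB:
--                 result.add(t)
--             token = []
--         else:
--             token.append(ch)
--     return result
-- ===== Notes on version B (the rewrite author's own statement) =====
-- stated objective: alternative
-- what changed: Replaces A's substitute-then-split-then-comprehension pipeline by a single left-to-right character scan with an explicit token accumulator that finalizes the current token at each delimiter character.
import Mathlib
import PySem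

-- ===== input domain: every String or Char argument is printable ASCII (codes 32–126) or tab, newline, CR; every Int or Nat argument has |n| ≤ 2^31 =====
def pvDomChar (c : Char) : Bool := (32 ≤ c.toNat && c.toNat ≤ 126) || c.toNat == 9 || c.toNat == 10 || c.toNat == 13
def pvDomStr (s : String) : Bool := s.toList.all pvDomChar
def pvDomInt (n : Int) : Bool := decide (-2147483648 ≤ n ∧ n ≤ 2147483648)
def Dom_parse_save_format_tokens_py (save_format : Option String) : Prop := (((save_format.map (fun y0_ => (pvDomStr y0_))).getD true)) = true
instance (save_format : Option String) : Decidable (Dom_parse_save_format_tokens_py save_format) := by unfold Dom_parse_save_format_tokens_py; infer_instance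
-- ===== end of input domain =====

-- B replaces A's replace/split/set-comprehension by a single left-to-right character
-- scan with an explicit token accumulator (objective: alternative decomposition, same cost).

-- the fixed vocabulary tuple ("simple", "divider", "timestamp", "bullet-list")
def pvVocab : List String := ["simple", "divider", "timestamp", "bullet-list"]

-- ===== PORT A =====
def parse_save_format_tokens_py (save_format : Option String) : List String :=
  match save_format with
  | none => []    -- 'not save_format' is true for None
  | some s =>
    if s = "" ∨ PySem.Str.strip s = "" then []    -- 'not save_format or not str(save_format).strip()'
    else
      let raw := PySem.Str.lower (PySem.Str.strip s)
      let frags := PySem.Chars.splitOn (PySem.Chars.replace raw.toList [' '] [',']) [',']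
      frags.foldl
        (fun acc t =>
          let t' := String.ofList (PySem.Chars.strip t)
          if t' ∈ pvVocab then PySem.Set.add acc t' else acc)
        PySem.Set.empty

-- ===== PORT B =====
def parse_save_format_tokens_py_alt (save_format : Option String) : List String :=
  match save_format with
  | none => []    -- 'if save_format is None: return result'
  | some s =>
    let raw := PySem.Str.lower (PySem.Str.strip s)
    let fin :=
      (raw.toList ++ [',']).foldl
        (fun (st : PySem.Set String × List Char) ch =>
          if ch = ' ' ∨ ch = ',' then
            let t := String.ofList (PySem.Chars.strip st.2)
            (if t ∈ pvVocab then PySem.Set.add st.1 t else st.1, [])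
          else (st.1, st.2 ++ [ch]))
        (PySem.Set.empty, [])
    fin.1

-- ===== PRECONDITION & SPEC =====
def Spec_parse_save_format_tokens_py (save_format : Option String) (out : List String) : Prop := out = parse_save_format_tokens_py_alt save_format
instance (save_format : Option String) (out : List String) : Decidable (Spec_parse_save_format_tokens_py save_format out) := by unfold Spec_parse_save_format_tokens_py; infer_instance

-- ===== CLAIM (what is proved, stated in full; the proofs are below) =====
def Claim_equal_parse_save_format_tokens_py : Prop := ∀ (save_format : Option String), Dom_parse_save_format_tokens_py save_format → Spec_parse_save_format_tokens_py save_format (parse_save_format_tokens_py save_format)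

-- ===== LEMMAS AND PROOFS =====

-- ' ' ↦ ',' , everything else unchanged (the effect of raw.replace(" ", ","))
def pvSub (c : Char) : Char := if c = ' ' then ',' else c

-- split at ',' only
def pvSplitC (pre : List Char) : List Char → List (List Char)
  | [] => [pre]
  | c :: r => if c = ',' then pre :: pvSplitC [] r else pvSplitC (pre ++ [c]) r

-- split at ' ' or ','
def pvSplitSC (pre : List Char) : List Char → List (List Char)
  | [] => [pre]
  | c :: r => if c = ' ' ∨ c = ',' then pre :: pvSplitSC [] r else pvSplitSC (pre ++ [c]) r

theorem pv_replace_go (fuel : Nat) (l acc : List Char) (h : l.length ≤ fuel) :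
    PySem.Chars.replace.go [' '] [','] fuel l acc = acc.reverse ++ l.map pvSub := by
  induction fuel generalizing l acc with
  | zero =>
    interval_cases hl : l.length
    · simp at hl; subst hl; simp [PySem.Chars.replace.go]
  | succ n ih =>
    cases l with
    | nil => simp [PySem.Chars.replace.go]
    | cons c rest =>
      simp only [PySem.Chars.replace.go]
      by_cases hc : c = ' '
      · subst hc
        rw [if_pos (by simp [List.isPrefixOf])]
        rw [ih _ _ (by simpa using Nat.le_of_succ_le_succ h)]
        simp [pvSub]
      · rw [if_neg (by simp [List.isPrefixOf, hc]; exact fun e => hc e.symm)]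
        rw [ih _ _ (by simpa using Nat.le_of_succ_le_succ h)]
        simp [pvSub, hc]

theorem pv_replace_eq (l : List Char) :
    PySem.Chars.replace l [' '] [','] = l.map pvSub := by
  simp only [PySem.Chars.replace]
  rw [if_neg (by simp)]
  simpa using pv_replace_go l.length l [] le_rfl

theorem pv_splitOn_go (fuel : Nat) (l cur acc : List Char) (accs : List (List Char))
    (h : l.length ≤ fuel) :
    PySem.Chars.splitOn.go [','] fuel l cur accs = accs.reverse ++ pvSplitC cur.reverse l := by
  induction fuel generalizing l cur accs with
  | zero =>
    interval_cases hl : l.length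
    · simp at hl; subst hl; simp [PySem.Chars.splitOn.go, pvSplitC]
  | succ n ih =>
    cases l with
    | nil => simp [PySem.Chars.splitOn.go, pvSplitC]
    | cons c rest =>
      simp only [PySem.Chars.splitOn.go]
      by_cases hc : c = ','
      · subst hc
        rw [if_pos (by simp [List.isPrefixOf])]
        simp only [List.length_singleton, List.drop_succ_cons, List.drop_zero]
        rw [ih _ _ _ (by simpa using Nat.le_of_succ_le_succ h)]
        simp [pvSplitC]
      · rw [if_neg (by simp [List.isPrefixOf]; exact fun e => hc e.symm)]
        rw [ih _ _ _ (by simpa using Nat.le_of_succ_le_succ h)]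
        simp [pvSplitC, hc]
  -- note: the unused binder (acc) keeps the statement total over splitOn.go's arguments
 
theorem pv_splitOn_eq (l : List Char) :
    PySem.Chars.splitOn l [','] = pvSplitC [] l := by
  simpa using pv_splitOn_go (l.length + 1) l [] [] [] (Nat.le_succ _)

theorem pv_splitC_map (l : List Char) (pre : List Char) :
    pvSplitC pre (l.map pvSub) = pvSplitSC pre l := by
  induction l generalizing pre with
  | nil => simp [pvSplitC, pvSplitSC]
  | cons c r ih =>
    by_cases hc : c = ' ' ∨ c = ','
    · rcases hc with hc | hc <;> subst hc <;>
        simp [pvSplitC, pvSplitSC, pvSub, ih]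
    · push_neg at hc
      simp [pvSplitC, pvSplitSC, pvSub, hc.1, hc.2, or_iff_not_imp_left, ih]

theorem pv_scan_eq (cs : List Char) (res : PySem.Set String) (tok : List Char) :
    (List.foldl
        (fun (st : PySem.Set String × List Char) ch =>
          if ch = ' ' ∨ ch = ',' then
            let t := String.ofList (PySem.Chars.strip st.2)
            (if t ∈ pvVocab then PySem.Set.add st.1 t else st.1, [])
          else (st.1, st.2 ++ [ch]))
        (res, tok) (cs ++ [','])).1
      = List.foldl
          (fun acc t =>
            let t' := String.ofList (PySem.Chars.strip t)
            if t' ∈ pvVocab then PySem.Set.add acc t' else acc)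
          res (pvSplitSC tok cs) := by
  induction cs generalizing res tok with
  | nil => simp [pvSplitSC]
  | cons c r ih =>
    by_cases hc : c = ' ' ∨ c = ','
    · simp only [List.cons_append, List.foldl_cons, if_pos hc, pvSplitSC, if_pos hc]
      exact ih _ _
    · simp only [List.cons_append, List.foldl_cons, if_neg hc, pvSplitSC, if_neg hc]
      exact ih _ _

-- ===== VERDICT (by name: the statement is the Claim_ definition above) =====
theorem parse_save_format_tokens_py_spec : Claim_equal_parse_save_format_tokens_py := by
  intro save_format _
  unfold Spec_parse_save_format_tokens_py
  cases save_format with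
  | none => rfl
  | some s =>
    simp only [parse_save_format_tokens_py, parse_save_format_tokens_py_alt]
    by_cases hs : s = "" ∨ PySem.Str.strip s = ""
    · rw [if_pos hs]
      have hstrip : PySem.Str.strip s = "" := by
        rcases hs with hs | hs
        · subst hs; rfl
        · exact hs
      rw [hstrip]
      decide
    · rw [if_neg hs]
      rw [pv_replace_eq, pv_splitOn_eq, pv_splitC_map, ← pv_scan_eq]
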